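-- pv_equiv track=rewrite | github.com/apassuello/crossword-helper | cli/src/fill/beam_search_autofill.py | _is_gibberish_pattern
-- ===== SOURCE A (Python) =====
-- def _is_gibberish_pattern(pattern: str) -> bool:
--     """
--     Check if a pattern contains obvious gibberish (repeated letters, impossible clusters).
--
--     Args:
--         pattern: Word or pattern to check (may contain '?' wildcards)
--
--     Returns:
--         True if pattern appears to be gibberish
--
--     Examples:
--         AAAAA → True (all same letter)
--         AAA → True (all same letter)
--         NNN → True (all same letter)
--         BRNNN → True (impossible consonant cluster + repeated N)
--         DRAMA → False (valid word pattern)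
--         D?AMA → False (partial valid pattern)
--     """
--     # Remove wildcards for checking
--     letters_only = pattern.replace('?', '')
--
--     if not letters_only or len(letters_only) < 3:
--         return False  # Too short to be obviously gibberish
--
--     # Check for 3+ repeated letters in a row
--     for i in range(len(letters_only) - 2):
--         if letters_only[i] == letters_only[i+1] == letters_only[i+2]:
--             return True  # AAA, NNN, etc.
--
--     # Check if entire pattern is same letter
--     if len(set(letters_only)) == 1:
--         return True  # AAAAA, NNN, etc.
--
--     # Check for impossible consonant clusters (4+ consonants)
--     vowels = set('AEIOUY')
--     consonant_run = 0
--     for char in letters_only: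
--         if char not in vowels:
--             consonant_run += 1
--             if consonant_run >= 4:
--                 return True  # BRNNN, STRNG, etc.
--         else:
--             consonant_run = 0
--
--     return False
-- ===== SOURCE B (Python) =====
-- def _runs(xs):
--     """Run-length encode xs into [[value, count], ...] (maximal runs of equal items)."""
--     out = []
--     for x in xs:
--         if out and out[-1][0] == x:
--             out[-1][1] += 1
--         else:
--             out.append([x, 1])
--     return out
--
--
-- def _is_gibberish_pattern(pattern: str) -> bool:
--     letters_only = pattern.replace('?', '')
--     if len(letters_only) < 3:
--         return False
--     # A run of 3+ identical letters covers both AAA-in-a-row and all-same-letter.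
--     if any(n >= 3 for _, n in _runs(letters_only)):
--         return True
--     # A run of 4+ consecutive consonants.
--     return any(k and n >= 4 for k, n in _runs(c not in 'AEIOUY' for c in letters_only))
-- ===== Notes on version B (the rewrite author's own statement) =====
-- stated objective: idiomatic
-- what changed: Replaces the index-window triple scan, the separate all-same-letter set check and the running consonant counter by a single run-length-encoding helper: a 3+ run of one letter and a 4+ run of consonants are read off the maximal runs (the set check becomes redundant).
import Mathlib
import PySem

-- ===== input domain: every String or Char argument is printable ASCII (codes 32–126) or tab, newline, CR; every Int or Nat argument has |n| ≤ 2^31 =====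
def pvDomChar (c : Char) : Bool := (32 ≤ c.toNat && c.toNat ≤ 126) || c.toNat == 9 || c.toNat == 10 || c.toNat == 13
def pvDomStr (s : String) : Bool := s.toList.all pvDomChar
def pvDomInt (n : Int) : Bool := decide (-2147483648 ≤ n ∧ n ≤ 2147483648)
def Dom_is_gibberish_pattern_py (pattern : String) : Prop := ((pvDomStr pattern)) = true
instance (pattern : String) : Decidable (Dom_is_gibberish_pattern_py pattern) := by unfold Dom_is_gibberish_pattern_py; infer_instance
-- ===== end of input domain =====

-- B replaces A's index-window scan + set check + running counter by one run-length-encoding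
-- helper from which both gibberish tests are read off (idiomatic decomposition, same cost).

-- ===== PORT A =====
def pvVowelsA : PySem.Set Char := PySem.Set.ofList "AEIOUY".toList

-- the 'for char in letters_only' loop with the running consonant counter and early return
def pvConsLoopA : List Char → Int → Bool
  | [], _ => false
  | c :: rest, run =>
    if !(PySem.Set.contains pvVowelsA c) then
      (if run + 1 ≥ 4 then true else pvConsLoopA rest (run + 1))
    else pvConsLoopA rest 0

def is_gibberish_pattern_py (pattern : String) : Bool :=
  let lettersOnly : List Char := (PySem.Str.replace pattern "?" "").toList
  if lettersOnly.length = 0 || lettersOnly.length < 3 then false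
  else if (PySem.List.pyRange 0 ((lettersOnly.length : Int) - 2) 1).any (fun i =>
      (PySem.List.pyGet? lettersOnly i == PySem.List.pyGet? lettersOnly (i + 1))
      && (PySem.List.pyGet? lettersOnly (i + 1) == PySem.List.pyGet? lettersOnly (i + 2))) then
    true
  else if (PySem.Set.ofList lettersOnly).length = 1 then true
  else pvConsLoopA lettersOnly 0

-- ===== PORT B =====
-- one step of B's _runs loop; the list is kept newest-run-first (Python appends at the end)
def pvRunsStep {α : Type} [BEq α] (out : List (α × Nat)) (x : α) : List (α × Nat) :=
  match out with
  | (k, n) :: t => if k == x then (k, n + 1) :: t else (x, 1) :: (k, n) :: t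
  | [] => [(x, 1)]

def pvRuns {α : Type} [BEq α] (xs : List α) : List (α × Nat) :=
  (xs.foldl pvRunsStep []).reverse

def is_gibberish_pattern_py_alt (pattern : String) : Bool :=
  let lettersOnly : List Char := (PySem.Str.replace pattern "?" "").toList
  if lettersOnly.length < 3 then false
  else if (pvRuns lettersOnly).any (fun p => decide (3 ≤ p.2)) then true
  else (pvRuns (lettersOnly.map (fun c => !("AEIOUY".toList.contains c)))).any
    (fun p => p.1 && decide (4 ≤ p.2))

-- ===== PRECONDITION & SPEC =====
def Spec_is_gibberish_pattern_py (pattern : String) (out : Bool) : Prop := out = is_gibberish_pattern_py_alt pattern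
instance (pattern : String) (out : Bool) : Decidable (Spec_is_gibberish_pattern_py pattern out) := by unfold Spec_is_gibberish_pattern_py; infer_instance

-- ===== CLAIM (what is proved, stated in full; the proofs are below) =====
def Claim_equal_is_gibberish_pattern_py : Prop := ∀ (pattern : String), Dom_is_gibberish_pattern_py pattern → Spec_is_gibberish_pattern_py pattern (is_gibberish_pattern_py pattern)

-- ===== LEMMAS AND PROOFS =====

-- canonical "some maximal run of ≥ m elements whose value satisfies P" scanner:
-- k = value of the current run, c = its length so far
def pvWin {α : Type} [BEq α] (P : α → Bool) (m : Nat) : α → Nat → List α → Bool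
  | k, c, [] => decide (m ≤ c) && P k
  | k, c, x :: xs =>
    (decide (m ≤ c) && P k) || (if k == x then pvWin P m k (c + 1) xs else pvWin P m x 1 xs)

theorem pvWin_of_le {α : Type} [BEq α] (P : α → Bool) (m : Nat) (k : α) (c : Nat)
    (l : List Char) (hm : m ≤ c) (hP : P k = true) :
    ∀ (xs : List α), pvWin P m k c xs = true := by
  intro xs
  cases xs <;> simp [pvWin, hm, hP]

theorem pvRunsStep_foldl_append {α : Type} [BEq α] :
    ∀ (l : List α) (k : α) (c : Nat) (t : List (α × Nat)),
      l.foldl pvRunsStep ((k, c) :: t) = l.foldl pvRunsStep [(k, c)] ++ t := by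
  intro l
  induction l with
  | nil => intro k c t; simp
  | cons x xs ih =>
    intro k c t
    by_cases h : (k == x) = true
    · simp only [List.foldl_cons, pvRunsStep, h, if_true]
      exact ih k (c + 1) t
    · have h' : (k == x) = false := by simpa using h
      simp only [List.foldl_cons, pvRunsStep, h', Bool.false_eq_true, if_false]
      rw [ih x 1 ((k, c) :: t), ih x 1 [(k, c)], List.append_assoc]
      simp
theorem pvRuns_any_eq_pvWin {α : Type} [BEq α] (P : α → Bool) (m : Nat) :
    ∀ (l : List α) (k : α) (c : Nat),
      (l.foldl pvRunsStep [(k, c)]).any (fun p => P p.1 && decide (m ≤ p.2))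
        = pvWin P m k c l := by
  intro l
  induction l with
  | nil => intro k c; simp [pvWin, Bool.and_comm]
  | cons x xs ih =>
    intro k c
    by_cases h : (k == x) = true
    · have hstep : pvRunsStep [(k, c)] x = [(k, c + 1)] := by simp [pvRunsStep, h]
      rw [List.foldl_cons, hstep, ih]
      by_cases hm : m ≤ c
      · by_cases hP : P k = true
        · rw [pvWin_of_le P m k (c + 1) [] (Nat.le_succ_of_le hm) hP xs]
          simp [pvWin, hm, hP, h]
        · have hP' : P k = false := by simpa using hP
          simp [pvWin, hP', h]
      · simp [pvWin, hm, h]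
    · have h' : (k == x) = false := by simpa using h
      have hstep : pvRunsStep [(k, c)] x = [(x, 1), (k, c)] := by
        simp [pvRunsStep, h', Bool.false_eq_true]
      rw [List.foldl_cons, hstep,
        pvRunsStep_foldl_append xs x 1 [(k, c)], List.any_append, ih]
      simp [pvWin, h', Bool.or_comm, Bool.and_comm]
theorem pvRuns_any {α : Type} [BEq α] (P : α → Bool) (m : Nat) (xs : List α) :
    (pvRuns xs).any (fun p => P p.1 && decide (m ≤ p.2))
      = (match xs with
          | [] => false
          | x :: t => pvWin P m x 1 t) := by
  cases xs with
  | nil => simp [pvRuns]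
  | cons x t =>
    simp only [pvRuns, List.any_reverse, List.foldl_cons, pvRunsStep]
    exact pvRuns_any_eq_pvWin P m t x 1

-- pairwise window spec for "three equal letters in a row"
def pvW3 : List Char → Bool
  | a :: b :: c :: t => (a == b && b == c) || pvW3 (b :: c :: t)
  | _ => false

theorem pvWin3_hi (k : Char) (c : Nat) (hc : 3 ≤ c) :
    ∀ (l : List Char), pvWin (fun _ => true) 3 k c l = true := by
  intro l; cases l <;> simp [pvWin, hc]

theorem pvWin3_both : ∀ (l : List Char),
    (∀ x, pvWin (fun _ => true) 3 x 1 l = pvW3 (x :: l)) ∧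
    (∀ x, pvWin (fun _ => true) 3 x 2 l = pvW3 (x :: x :: l)) := by
  intro l
  induction l with
  | nil => constructor <;> intro x <;> simp [pvWin, pvW3]
  | cons y ys ih =>
    constructor
    · intro x
      by_cases h : (x == y) = true
      · have hxy : x = y := by simpa using h
        subst hxy
        simp only [pvWin, h, if_true]
        simpa using ih.2 x
      · have h' : (x == y) = false := by simpa using h
        simp only [pvWin, h', Bool.false_eq_true, if_false]
        cases ys with
        | nil => simp [pvWin, pvW3, h']
        | cons z zs =>
          rw [ih.1 y]
          simp [pvW3, h']
    · intro x
      by_cases h : (x == y) = true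
      · have hxy : x = y := by simpa using h
        subst hxy
        simp only [pvWin, h, if_true]
        rw [pvWin3_hi x 3 (le_refl 3) ys]
        simp [pvW3]
      · have h' : (x == y) = false := by simpa using h
        simp only [pvWin, h', Bool.false_eq_true, if_false]
        rw [ih.1 y]
        cases ys with
        | nil => simp [pvW3, h']
        | cons z zs => simp [pvW3, h']

-- the B-side triple test equals pvW3
theorem pvRuns_three (l : List Char) :
    (pvRuns l).any (fun p => decide (3 ≤ p.2)) = pvW3 l := by
  have h : (pvRuns l).any (fun p => decide (3 ≤ p.2))
      = (pvRuns l).any (fun p => (fun _ => true) p.1 && decide (3 ≤ p.2)) := by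
    simp
  rw [h, pvRuns_any (fun _ => true) 3 l]
  cases l with
  | nil => simp [pvW3]
  | cons x t => exact (pvWin3_both t).1 x

-- the A-side index scan equals pvW3
theorem pvChk_shift (a : Char) (l : List Char) (b : Int) :
    (PySem.List.pyRange 1 b 1).any (fun i =>
        (PySem.List.pyGet? (a :: l) i == PySem.List.pyGet? (a :: l) (i + 1))
        && (PySem.List.pyGet? (a :: l) (i + 1) == PySem.List.pyGet? (a :: l) (i + 2)))
      = (PySem.List.pyRange 0 (b - 1) 1).any (fun i =>
        (PySem.List.pyGet? l i == PySem.List.pyGet? l (i + 1))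
        && (PySem.List.pyGet? l (i + 1) == PySem.List.pyGet? l (i + 2))) := by
  rw [PySem.List.pyRange_one 1 b, PySem.List.pyRange_one 0 (b - 1)]
  simp only [Int.sub_zero, List.any_map]
  congr 1
  funext k
  simp only [Function.comp]
  have e0 : (0 : Int) + (k : Int) = (k : Int) := by ring
  have e1 : (1 : Int) + (k : Int) = (k : Int) + 1 := by ring
  have e2 : (k : Int) + 1 + 1 = ((k + 1 : Nat) : Int) + 1 := by push_cast; ring
  have e3 : (k : Int) + 1 + 2 = ((k + 2 : Nat) : Int) + 1 := by push_cast; ring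
  rw [e0, e1, e2, e3, PySem.List.pyGet?_cons_succ, PySem.List.pyGet?_cons_succ,
    PySem.List.pyGet?_cons_succ]
  push_cast
  rfl

theorem pvIdx3 : ∀ (l : List Char),
    (PySem.List.pyRange 0 ((l.length : Int) - 2) 1).any (fun i =>
        (PySem.List.pyGet? l i == PySem.List.pyGet? l (i + 1))
        && (PySem.List.pyGet? l (i + 1) == PySem.List.pyGet? l (i + 2)))
      = pvW3 l := by
  intro l
  induction l with
  | nil => simp [PySem.List.pyRange_one_eq_nil, pvW3]
  | cons a rest ih =>
    cases rest with
    | nil =>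
      rw [PySem.List.pyRange_one_eq_nil (by simp)]
      simp [pvW3]
    | cons b rest2 =>
      cases rest2 with
      | nil =>
        rw [PySem.List.pyRange_one_eq_nil (by simp)]
        simp [pvW3]
      | cons c t =>
        have hlen : ((a :: b :: c :: t).length : Int) - 2 = (t.length : Int) + 1 := by
          simp; ring
        rw [hlen, PySem.List.pyRange_one_cons (by positivity), List.any_cons]
        rw [show (0 : Int) + 1 = 1 by norm_num]
        rw [pvChk_shift a (b :: c :: t) ((t.length : Int) + 1)]
        have hlen2 : (t.length : Int) + 1 - 1 = ((b :: c :: t).length : Int) - 2 := by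
          simp; omega
        rw [hlen2, ih]
        have hs1 : (0 : Int) ≤ (t.length : Int) + 1 := by positivity
        have hs2 : (0 : Int) ≤ (t.length : Int) + 1 + 1 := by positivity
        have hs3 : (2 : Int) ≤ (t.length : Int) + 1 + 1 := by omega
        simp [pvW3, PySem.List.pyGet?, PySem.List.pyIdx?, hs1, hs2, hs3]
-- all letters equal (set size 1) with length ≥ 3 forces a triple
theorem pvSetOne (l : List Char) (h3 : 3 ≤ l.length)
    (h1 : (PySem.Set.ofList l).length = 1) : pvW3 l = true := by
  match l, h3 with
  | a :: b :: c :: t, _ =>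
    rcases List.length_eq_one_iff.mp h1 with ⟨x, hx⟩
    have ha : a = x := by
      have : a ∈ PySem.Set.ofList (a :: b :: c :: t) :=
        (PySem.Set.mem_ofList _ _).mpr (by simp)
      rw [hx] at this; simpa using this
    have hb : b = x := by
      have : b ∈ PySem.Set.ofList (a :: b :: c :: t) :=
        (PySem.Set.mem_ofList _ _).mpr (by simp)
      rw [hx] at this; simpa using this
    have hc : c = x := by
      have : c ∈ PySem.Set.ofList (a :: b :: c :: t) :=
        (PySem.Set.mem_ofList _ _).mpr (by simp)
      rw [hx] at this; simpa using this
    subst ha hb hc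
    simp [pvW3]

-- the two consonant tests agree
theorem pvVowelsA_eq : pvVowelsA = "AEIOUY".toList := by decide

def pvIsCons (c : Char) : Bool := !("AEIOUY".toList.contains c)

theorem pvWin4_hi (k : Bool) (c : Nat) (hc : 4 ≤ c) (hk : k = true) :
    ∀ (l : List Bool), pvWin (fun b => b) 4 k c l = true := by
  intro l; cases l <;> simp [pvWin, hc, hk]

theorem pvMemV (x : Char) : x ∈ pvVowelsA ↔ pvIsCons x = false := by
  rw [pvVowelsA_eq]
  simp [pvIsCons]
  tauto

theorem pvConsLoopA_cons_cons (x : Char) (xs : List Char) (r : Int) (hm : ¬ x ∈ pvVowelsA) :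
    pvConsLoopA (x :: xs) r = if r + 1 ≥ 4 then true else pvConsLoopA xs (r + 1) := by
  simp [pvConsLoopA, hm]

theorem pvConsLoopA_cons_vow (x : Char) (xs : List Char) (r : Int) (hm : x ∈ pvVowelsA) :
    pvConsLoopA (x :: xs) r = pvConsLoopA xs 0 := by
  simp [pvConsLoopA, hm]

set_option maxRecDepth 4096 in
theorem pvConsLoop_win : ∀ (l : List Char),
    (∀ c : Nat, 1 ≤ c → c ≤ 3 →
       pvConsLoopA l (c : Int) = pvWin (fun b => b) 4 true c (l.map pvIsCons)) ∧
    (∀ c : Nat, pvConsLoopA l 0 = pvWin (fun b => b) 4 false c (l.map pvIsCons)) := by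
  intro l
  induction l with
  | nil =>
    refine ⟨fun c hc1 hc3 => ?_, fun c => ?_⟩
    · have h4 : ¬ (4 ≤ c) := by omega
      simp [pvConsLoopA, pvWin, h4]
    · simp [pvConsLoopA, pvWin]
  | cons x xs ih =>
    refine ⟨fun c hc1 hc3 => ?_, fun c => ?_⟩
    · by_cases hx : pvIsCons x = true
      · have hm : ¬ (x ∈ pvVowelsA) := by
          intro hmem
          rw [(pvMemV x).mp hmem] at hx
          exact Bool.false_ne_true hx
        by_cases hc : c = 3
        · subst hc
          have hL : pvConsLoopA (x :: xs) ((3 : Nat) : Int) = true := by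
            have h4 : ((3 : Nat) : Int) + 1 ≥ 4 := by norm_num
            rw [pvConsLoopA_cons_cons x xs _ hm, if_pos h4]
          rw [hL]
          have h44 : pvWin (fun b => b) 4 true 4 (List.map pvIsCons xs) = true :=
            pvWin4_hi true 4 (le_refl 4) rfl _
          have h43 : ¬ (4 ≤ 3) := by omega
          simp [List.map_cons, hx, pvWin, h43, h44]
        · have hno4 : ¬ ((c : Int) + 1 ≥ 4) := by omega
          have hstep : pvConsLoopA (x :: xs) (c : Int) = pvConsLoopA xs ((c + 1 : Nat) : Int) := by
            have hcast : (c : Int) + 1 = ((c + 1 : Nat) : Int) := by push_cast; ring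
            rw [pvConsLoopA_cons_cons x xs _ hm, if_neg hno4, hcast]
          have h4c : ¬ (4 ≤ c) := by omega
          rw [hstep, ih.1 (c + 1) (by omega) (by omega)]
          simp [List.map_cons, hx, pvWin, h4c]
      · have hx' : pvIsCons x = false := by simpa using hx
        have hm : x ∈ pvVowelsA := (pvMemV x).mpr hx'
        have hstep : pvConsLoopA (x :: xs) (c : Int) = pvConsLoopA xs 0 :=
          pvConsLoopA_cons_vow x xs _ hm
        have h4c : ¬ (4 ≤ c) := by omega
        rw [hstep, ih.2 1]
        simp [List.map_cons, hx', pvWin, h4c]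
    · by_cases hx : pvIsCons x = true
      · have hm : ¬ (x ∈ pvVowelsA) := by
          intro hmem
          rw [(pvMemV x).mp hmem] at hx
          exact Bool.false_ne_true hx
        have hno4 : ¬ ((0 : Int) + 1 ≥ 4) := by norm_num
        have hstep : pvConsLoopA (x :: xs) 0 = pvConsLoopA xs ((1 : Nat) : Int) := by
          have hcast : (0 : Int) + 1 = ((1 : Nat) : Int) := by norm_num
          rw [pvConsLoopA_cons_cons x xs _ hm, if_neg hno4, hcast]
        rw [hstep, ih.1 1 (le_refl 1) (by omega)]
        simp [List.map_cons, hx, pvWin]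
      · have hx' : pvIsCons x = false := by simpa using hx
        have hm : x ∈ pvVowelsA := (pvMemV x).mpr hx'
        have hstep : pvConsLoopA (x :: xs) 0 = pvConsLoopA xs 0 :=
          pvConsLoopA_cons_vow x xs _ hm
        rw [hstep, ih.2 (c + 1)]
        simp [List.map_cons, hx', pvWin]

theorem pvCons_main (l : List Char) :
    pvConsLoopA l 0
      = (pvRuns (l.map pvIsCons)).any (fun p => p.1 && decide (4 ≤ p.2)) := by
  have h : (fun p : Bool × Nat => p.1 && decide (4 ≤ p.2))
      = (fun p : Bool × Nat => (fun b => b) p.1 && decide (4 ≤ p.2)) := rfl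
  rw [h, pvRuns_any (fun b => b) 4 (l.map pvIsCons)]
  cases l with
  | nil => simp [pvConsLoopA]
  | cons x xs =>
    simp only [List.map_cons]
    by_cases hx : pvIsCons x = true
    · have hm : ¬ (x ∈ pvVowelsA) := by
        intro hmem
        rw [(pvMemV x).mp hmem] at hx
        exact Bool.false_ne_true hx
      have hno4 : ¬ ((0 : Int) + 1 ≥ 4) := by norm_num
      have hstep : pvConsLoopA (x :: xs) 0 = pvConsLoopA xs ((1 : Nat) : Int) := by
        have hcast : (0 : Int) + 1 = ((1 : Nat) : Int) := by norm_num
        rw [pvConsLoopA_cons_cons x xs _ hm, if_neg hno4, hcast]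
      rw [hstep, (pvConsLoop_win xs).1 1 (le_refl 1) (by omega), hx]
    · have hx' : pvIsCons x = false := by simpa using hx
      have hm : x ∈ pvVowelsA := (pvMemV x).mpr hx'
      have hstep : pvConsLoopA (x :: xs) 0 = pvConsLoopA xs 0 :=
        pvConsLoopA_cons_vow x xs _ hm
      rw [hstep, (pvConsLoop_win xs).2 1, hx']

-- ===== VERDICT (by name: the statement is the Claim_ definition above) =====
theorem is_gibberish_pattern_py_spec : Claim_equal_is_gibberish_pattern_py := by
  intro pattern _
  unfold Spec_is_gibberish_pattern_py is_gibberish_pattern_py is_gibberish_pattern_py_alt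
  set l : List Char := (PySem.Str.replace pattern "?" "").toList with hl
  by_cases hshort : l.length < 3
  · have : l.length = 0 ∨ l.length < 3 := Or.inr hshort
    simp [hshort]
  · have h3 : 3 ≤ l.length := by omega
    have hne : ¬ (l.length = 0) := by omega
    simp only [hne, hshort, if_neg, Bool.false_eq_true, or_self, ite_false, if_false]
    rw [pvIdx3 l, pvRuns_three l]
    by_cases hw : pvW3 l = true
    · simp [hw]
    · have hw' : pvW3 l = false := by simpa using hw
      have hset : ¬ ((PySem.Set.ofList l).length = 1) := by
        intro h1
        exact hw (pvSetOne l h3 h1)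
      simp only [hw', if_false, Bool.false_eq_true, ite_false, hset]
      exact pvCons_main l
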